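-- pv_equiv track=rewrite | github.com/sashu2310/cartograph | cartograph/v2/cli.py | _resolve_qname
-- ===== SOURCE A (Python) =====
-- def _resolve_qname(functions: dict, name: str) -> str | None:
--     """Map a user-supplied name to a full qname: exact → suffix → substring.
--
--     Matches v1's `_find_function` behaviour. First suffix hit and first
--     substring hit win — no scoring, no ranking. Callers get `None` if
--     nothing matches; _qname_suggestions() supplies hints for the error.
--     """
--     if name in functions:
--         return name
--     for qn in functions:
--         if qn.endswith(f".{name}"):
--             return qn
--     needle = name.lower()
--     for qn in functions:
--         if needle in qn.lower():
--             return qn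
--     return None
-- ===== SOURCE B (Python) =====
-- def _resolve_qname(functions: dict, name: str) -> str | None:
--     if name in functions:
--         return name
--     suffix = "." + name
--     needle = name.lower()
--     # rank every matching key (0 = suffix match, 1 = substring match) and pick
--     # the lexicographic minimum of (rank, position); keys are distinct in
--     # position, so min never compares the third component.
--     cands = [((0 if qn.endswith(suffix) else 1), i, qn)
--              for i, qn in enumerate(functions)
--              if qn.endswith(suffix) or needle in qn.lower()]
--     if not cands:
--         return None
--     return min(cands)[2]
-- ===== Notes on version B (the rewrite author's own statement) =====
-- stated objective: alternative
-- what changed: Replaces A's staged early-return scans by a rank-and-select algorithm: every matching key gets a (rank, position) score (0 = case-sensitive suffix match, 1 = case-insensitive substring match) and the lexicographic minimum is returned, reproducing the exact>suffix>substring, first-hit-wins priority.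
import Mathlib
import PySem

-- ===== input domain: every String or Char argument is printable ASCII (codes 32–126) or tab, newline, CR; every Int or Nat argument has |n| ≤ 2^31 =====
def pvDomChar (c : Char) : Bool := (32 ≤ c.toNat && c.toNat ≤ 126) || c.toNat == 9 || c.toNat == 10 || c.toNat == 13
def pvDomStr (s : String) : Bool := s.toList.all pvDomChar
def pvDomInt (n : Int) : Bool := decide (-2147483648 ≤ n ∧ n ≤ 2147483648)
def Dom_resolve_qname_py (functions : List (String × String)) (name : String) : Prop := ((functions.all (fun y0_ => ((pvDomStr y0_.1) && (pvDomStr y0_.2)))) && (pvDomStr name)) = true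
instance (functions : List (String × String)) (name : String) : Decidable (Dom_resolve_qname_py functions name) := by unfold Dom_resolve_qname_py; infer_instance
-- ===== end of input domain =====

-- B replaces A's two staged early-return scans by ranking every matching key (0 = suffix, 1 = substring)
-- with its position and selecting the lexicographic minimum (alternative decomposition; same cost).
-- ===== PORT A =====
def resolve_qname_py (functions : List (String × String)) (name : String) : Option String :=
  if functions.any (fun p => p.1 == name) then some name
  else
    match functions.find? (fun p => PySem.Str.endswith p.1 ("." ++ name)) with
    | some p => some p.1
    | none =>
        let needle := PySem.Str.lower name
        match functions.find? (fun p => PySem.Str.isIn needle (PySem.Str.lower p.1)) with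
        | some p => some p.1
        | none => none

-- ===== PORT B =====
-- Python's tuple min: left fold keeping the lexicographically smaller triple (left-biased on ties).
-- The positions are pairwise distinct, so Python never compares the third component; the fold
-- compares (rank, position) only, which is exact here.
def pvPick (m c : Int × Int × String) : Int × Int × String :=
  if c.1 < m.1 ∨ (c.1 = m.1 ∧ c.2.1 < m.2.1) then c else m

def resolve_qname_py_alt (functions : List (String × String)) (name : String) : Option String :=
  if functions.any (fun p => p.1 == name) then some name
  else
    let suffix := "." ++ name
    let needle := PySem.Str.lower name
    let cands := (PySem.List.enumerate (functions.map Prod.fst)).filterMap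
      (fun iq => if PySem.Str.endswith iq.2 suffix || PySem.Str.isIn needle (PySem.Str.lower iq.2)
        then some (((if PySem.Str.endswith iq.2 suffix then 0 else 1) : Int), iq.1, iq.2) else none)
    match cands with
    | [] => none
    | c :: rest => some (rest.foldl pvPick c).2.2

-- ===== PRECONDITION & SPEC =====
def Spec_resolve_qname_py (functions : List (String × String)) (name : String) (out : Option String) : Prop := out = resolve_qname_py_alt functions name
instance (functions : List (String × String)) (name : String) (out : Option String) : Decidable (Spec_resolve_qname_py functions name out) := by unfold Spec_resolve_qname_py; infer_instance

-- ===== CLAIM =====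
def Claim_equal_resolve_qname_py : Prop := ∀ (functions : List (String × String)) (name : String), Dom_resolve_qname_py functions name → Spec_resolve_qname_py functions name (resolve_qname_py functions name)

-- ===== LEMMAS AND PROOFS =====
-- the candidate list, rebuilt as a structural recursion with an explicit start index
def candsF (sufP subP : String → Bool) : Int → List String → List (Int × Int × String)
  | _, [] => []
  | i, q :: t =>
      (if sufP q || subP q then [((if sufP q then (0 : Int) else 1), i, q)] else [])
        ++ candsF sufP subP (i + 1) t

theorem pick_keep (acc c : Int × Int × String) (h : ¬ (c.1 < acc.1 ∨ (c.1 = acc.1 ∧ c.2.1 < acc.2.1))) :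
    pvPick acc c = acc := by
  unfold pvPick; exact if_neg h

theorem pick_move (acc c : Int × Int × String) (h : c.1 < acc.1 ∨ (c.1 = acc.1 ∧ c.2.1 < acc.2.1)) :
    pvPick acc c = c := by
  unfold pvPick; exact if_pos h

theorem cands_eq (sufP subP : String → Bool) (l : List String) (s : Int) :
    (PySem.List.enumerate l s).filterMap
      (fun iq => if sufP iq.2 || subP iq.2
        then some ((if sufP iq.2 then (0 : Int) else 1), iq.1, iq.2) else none)
    = candsF sufP subP s l := by
  induction l generalizing s with
  | nil => simp [candsF, PySem.List.enumerate_nil]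
  | cons q t ih =>
      rw [PySem.List.enumerate_cons, List.filterMap_cons, ih]
      by_cases h : (sufP q || subP q) = true <;> simp [candsF, h]

theorem foldl_pick_rank0 (sufP subP : String → Bool) (t : List String) (i : Int)
    (acc : Int × Int × String) (h0 : acc.1 = 0) (hlt : acc.2.1 < i) :
    (candsF sufP subP i t).foldl pvPick acc = acc := by
  induction t generalizing i with
  | nil => simp [candsF]
  | cons q t ih =>
      by_cases h : (sufP q || subP q) = true
      · simp only [candsF, h, if_true, List.singleton_append, List.foldl_cons]
        rw [pick_keep acc _ (by by_cases hq : sufP q = true <;> simp [hq] <;> omega)]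
        exact ih (i + 1) (by omega)
      · simp only [candsF, h, Bool.false_eq_true, if_false, List.nil_append]
        exact ih (i + 1) (by omega)

theorem foldl_pick_rank1 (sufP subP : String → Bool) (t : List String) (i : Int)
    (acc : Int × Int × String) (h1 : acc.1 = 1) (hlt : acc.2.1 < i) :
    (t.find? sufP = none ∧ (candsF sufP subP i t).foldl pvPick acc = acc) ∨
    (∃ q j, t.find? sufP = some q ∧ (candsF sufP subP i t).foldl pvPick acc = (0, j, q)) := by
  induction t generalizing i with
  | nil => left; simp [candsF]
  | cons q t ih =>
      by_cases hs : sufP q = true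
      · right
        refine ⟨q, i, ?_, ?_⟩
        · simp [List.find?_cons, hs]
        · simp only [candsF, hs, Bool.true_or, if_true, List.singleton_append, List.foldl_cons]
          rw [pick_move acc _ (by simp [hs]; omega)]
          exact foldl_pick_rank0 sufP subP t (i + 1) (0, i, q) rfl (by dsimp only; omega)
      · by_cases hb : subP q = true
        · simp only [candsF, hs, hb, Bool.or_true, if_true, Bool.false_eq_true, if_false,
            List.singleton_append, List.foldl_cons]
          rw [pick_keep acc _ (by simp [hs]; omega)]
          rcases ih (i + 1) (by omega) with ⟨hf, he⟩ | ⟨q', j, hf, he⟩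
          · left; exact ⟨by simp [List.find?_cons, hs, hf], he⟩
          · right; exact ⟨q', j, by simp [List.find?_cons, hs, hf], he⟩
        · have hcand : (sufP q || subP q) = false := by simp [hs, hb]
          simp only [candsF, hcand, Bool.false_eq_true, if_false, List.nil_append]
          rcases ih (i + 1) (by omega) with ⟨hf, he⟩ | ⟨q', j, hf, he⟩
          · left; exact ⟨by simp [List.find?_cons, hs, hf], he⟩
          · right; exact ⟨q', j, by simp [List.find?_cons, hs, hf], he⟩

theorem min_cands_eq_staged (sufP subP : String → Bool) (keys : List String) (i : Int) :
    (match candsF sufP subP i keys with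
     | [] => (none : Option String)
     | c :: rest => some ((rest.foldl pvPick c).2.2))
    = match keys.find? sufP with
      | some q => some q
      | none =>
          match keys.find? subP with
          | some q => some q
          | none => none := by
  induction keys generalizing i with
  | nil => simp [candsF]
  | cons q t ih =>
      by_cases hs : sufP q = true
      · simp only [candsF, hs, Bool.true_or, if_true, List.singleton_append,
          List.find?_cons, hs]
        rw [foldl_pick_rank0 sufP subP t (i + 1) _ rfl (by dsimp only; omega)]
      · by_cases hb : subP q = true
        · simp only [candsF, hs, hb, Bool.or_true, if_true, Bool.false_eq_true, if_false,
            List.singleton_append]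
          rcases foldl_pick_rank1 sufP subP t (i + 1) ((1 : Int), i, q) rfl (by dsimp only; omega)
            with ⟨hf, he⟩ | ⟨q', j, hf, he⟩
          · rw [he]; simp [List.find?_cons, hs, hb, hf]
          · rw [he]; simp [List.find?_cons, hs, hf]
        · have hcand : (sufP q || subP q) = false := by simp [hs, hb]
          simp only [candsF, hcand, Bool.false_eq_true, if_false, List.nil_append]
          rw [ih (i + 1)]
          simp [List.find?_cons, hs, hb]

-- ===== VERDICT =====
theorem resolve_qname_py_spec : Claim_equal_resolve_qname_py := by
  intro functions name _
  unfold Spec_resolve_qname_py resolve_qname_py resolve_qname_py_alt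
  split
  · rfl
  · dsimp only
    rw [cands_eq (fun qn => PySem.Str.endswith qn ("." ++ name))
        (fun qn => PySem.Str.isIn (PySem.Str.lower name) (PySem.Str.lower qn))
        (functions.map Prod.fst) 0,
      min_cands_eq_staged]
    rw [List.find?_map, List.find?_map]
    have e1 : List.find? ((fun qn => PySem.Str.endswith qn ("." ++ name)) ∘ Prod.fst) functions
        = List.find? (fun p => PySem.Str.endswith p.1 ("." ++ name)) functions := rfl
    have e2 : List.find? ((fun qn => PySem.Str.isIn (PySem.Str.lower name) (PySem.Str.lower qn)) ∘ Prod.fst) functions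
        = List.find? (fun p => PySem.Str.isIn (PySem.Str.lower name) (PySem.Str.lower p.1)) functions := rfl
    rw [e1, e2]
    cases functions.find? (fun p => PySem.Str.endswith p.1 ("." ++ name)) <;>
      cases functions.find? (fun p => PySem.Str.isIn (PySem.Str.lower name) (PySem.Str.lower p.1)) <;>
        simp
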